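-- pv_equiv track=rewrite | github.com/cabdisalanxasan9-rgb/ccna | mysite/core/lab_engine.py | normalize_protocols
-- ===== SOURCE A (Python) =====
-- SUPPORTED_PROTOCOLS = ("OSPF", "RIP", "EIGRP", "STATIC", "VLAN", "NAT", "PORT-SECURITY")
--
-- def normalize_protocols(protocols: list[str]) -> list[str]:
--     clean = []
--     seen = set()
--     for item in protocols:
--         p = item.strip().upper()
--         if p in SUPPORTED_PROTOCOLS and p not in seen:
--             clean.append(p)
--             seen.add(p)
--     if not clean:
--         clean = ["OSPF"]
--     return clean
-- ===== SOURCE B (Python) =====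
-- SUPPORTED_PROTOCOLS = ("OSPF", "RIP", "EIGRP", "STATIC", "VLAN", "NAT", "PORT-SECURITY")
--
-- def normalize_protocols(protocols: list[str]) -> list[str]:
--     norm = [p.strip().upper() for p in protocols]
--     hits = sorted((p for p in SUPPORTED_PROTOCOLS if p in norm), key=norm.index)
--     return hits if hits else ["OSPF"]
-- ===== Notes on version B (the rewrite author's own statement) =====
-- stated objective: alternative
-- what changed: Inverts the traversal: instead of a single pass over the input with a manual seen-set appending supported items, B normalizes the input, then iterates over the fixed SUPPORTED_PROTOCOLS tuple collecting those that occur, and sorts these hits by their first-occurrence index (norm.index) to reconstruct the input order.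
import Mathlib
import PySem

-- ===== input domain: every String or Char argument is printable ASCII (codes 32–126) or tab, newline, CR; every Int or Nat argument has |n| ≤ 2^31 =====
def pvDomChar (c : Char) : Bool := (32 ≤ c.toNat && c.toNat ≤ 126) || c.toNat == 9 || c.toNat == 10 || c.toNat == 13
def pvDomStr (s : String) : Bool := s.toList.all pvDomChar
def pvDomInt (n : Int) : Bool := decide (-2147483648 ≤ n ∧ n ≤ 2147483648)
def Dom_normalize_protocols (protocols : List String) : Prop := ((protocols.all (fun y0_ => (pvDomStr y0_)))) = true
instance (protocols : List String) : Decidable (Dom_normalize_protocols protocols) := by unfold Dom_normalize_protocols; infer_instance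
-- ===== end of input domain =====

-- B inverts the traversal: instead of scanning the input with a manual seen-set, it scans the
-- fixed supported tuple once and sorts the hits by first-occurrence index in the normalized
-- input; same result, an alternative decomposition of the same cost.

-- ===== PORT A =====
def pvSupported : List String := ["OSPF", "RIP", "EIGRP", "STATIC", "VLAN", "NAT", "PORT-SECURITY"]

-- literal port of A's loop: state is (clean, seen)
def pvStepA (st : List String × PySem.Set String) (item : String) : List String × PySem.Set String :=
  let p := PySem.Str.upper (PySem.Str.strip item)
  if pvSupported.contains p && !(PySem.Set.contains st.2 p) then
    (st.1 ++ [p], PySem.Set.add st.2 p)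
  else st

def normalize_protocols (protocols : List String) : List String :=
  let st := protocols.foldl pvStepA ([], PySem.Set.empty)
  if st.1 = [] then ["OSPF"] else st.1

-- ===== PORT B =====
-- port of Source B: normalize all, collect supported protocols that occur, sort by norm.index
def normalize_protocols_alt (protocols : List String) : List String :=
  let norm := protocols.map (fun p => PySem.Str.upper (PySem.Str.strip p))
  let hits := PySem.List.sorted (pvSupported.filter (fun p => norm.contains p))
      (fun p => (PySem.List.index? norm p).getD 0)  -- norm.index p; the filter guarantees p ∈ norm, so the default is never used
  if hits = [] then ["OSPF"] else hits

-- ===== PRECONDITION & SPEC =====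
def Spec_normalize_protocols (protocols : List String) (out : List String) : Prop := out = normalize_protocols_alt protocols
instance (protocols : List String) (out : List String) : Decidable (Spec_normalize_protocols protocols out) := by unfold Spec_normalize_protocols; infer_instance

-- ===== CLAIM (what is proved, stated in full; the proofs are below) =====
def Claim_equal_normalize_protocols : Prop := ∀ (protocols : List String), Dom_normalize_protocols protocols → Spec_normalize_protocols protocols (normalize_protocols protocols)

-- ===== LEMMAS AND PROOFS =====

-- A's loop, with `seen` in sync with `clean`, is exactly `Set.add` folded over the filtered normalized items.
lemma pvFoldA_eq : ∀ (protocols acc : List String) (seen : PySem.Set String),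
    (∀ x, x ∈ seen ↔ x ∈ acc) →
    (protocols.foldl pvStepA (acc, seen)).1 =
      ((protocols.map (fun p => PySem.Str.upper (PySem.Str.strip p))).filter
        (fun p => pvSupported.contains p)).foldl PySem.Set.add acc
  | [], acc, seen, _ => by simp
  | item :: rest, acc, seen, h => by
    simp only [List.foldl_cons, List.map_cons, List.filter_cons]
    set p := PySem.Str.upper (PySem.Str.strip item) with hp
    by_cases hs : p ∈ pvSupported
    · by_cases hin : p ∈ seen
      · have hstep : pvStepA (acc, seen) item = (acc, seen) := by
          simp [pvStepA, PySem.Set.contains, ← hp, hin]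
        have hadd : PySem.Set.add acc p = acc := by
          simp [PySem.Set.add, PySem.Set.contains, (h p).mp hin]
        rw [hstep, if_pos (by simpa using hs), List.foldl_cons, hadd]
        exact pvFoldA_eq rest acc seen h
      · have hstep : pvStepA (acc, seen) item = (acc ++ [p], PySem.Set.add seen p) := by
          simp [pvStepA, PySem.Set.contains, ← hp, hin, hs]
        have hnacc : p ∉ acc := fun hx => hin ((h p).mpr hx)
        have hadd : PySem.Set.add acc p = acc ++ [p] := by
          simp [PySem.Set.add, PySem.Set.contains, hnacc]
        rw [hstep, if_pos (by simpa using hs), List.foldl_cons, hadd]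
        exact pvFoldA_eq rest (acc ++ [p]) (PySem.Set.add seen p) (by
          intro x
          simp [PySem.Set.mem_add, h x])
    · have hstep : pvStepA (acc, seen) item = (acc, seen) := by
        simp [pvStepA, PySem.Set.contains, ← hp, hs]
      rw [hstep, if_neg (by simpa using hs)]
      exact pvFoldA_eq rest acc seen h

-- first-occurrence dedup: fold of Set.add with any accumulator, the cons step, filter commutation,
-- and the strictly-increasing first-index order that names it as B's sort result
lemma pvFoldAdd_acc : ∀ (l acc : List String),
    List.foldl PySem.Set.add acc l =
      acc ++ (List.foldl PySem.Set.add ([] : List String) l).filter (fun y => !acc.contains y)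
  | [], acc => by simp
  | x :: l, acc => by
    rw [List.foldl_cons, List.foldl_cons, pvFoldAdd_acc l (PySem.Set.add acc x),
        pvFoldAdd_acc l (PySem.Set.add [] x)]
    have hadd0 : PySem.Set.add ([] : List String) x = [x] := by
      simp [PySem.Set.add, PySem.Set.contains]
    rw [hadd0]
    by_cases hx : x ∈ acc
    · have h1 : PySem.Set.add acc x = acc := by
        simp [PySem.Set.add, PySem.Set.contains, hx]
      rw [h1, List.filter_append, List.filter_filter]
      have h2 : List.filter (fun y => !acc.contains y) [x] = [] := by
        simp [hx]
      rw [h2, List.nil_append]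
      congr 1
      apply List.filter_congr
      intro y _
      by_cases hyx : y = x
      · subst hyx; simp [hx]
      · simp [hyx]
    · have h1 : PySem.Set.add acc x = acc ++ [x] := by
        simp [PySem.Set.add, PySem.Set.contains, hx]
      rw [h1, List.filter_append, List.filter_filter]
      have h2 : List.filter (fun y => !acc.contains y) [x] = [x] := by
        simp [hx]
      rw [h2, List.append_assoc]
      congr 2
      apply List.filter_congr
      intro y _
      by_cases hyx : y = x
      · subst hyx; simp
      · simp [hyx, Bool.and_comm]

lemma pvDedup_cons (x : String) (l : List String) :
    PySem.List.dedup (x :: l) = x :: (PySem.List.dedup l).filter (fun y => y ≠ x) := by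
  simp only [PySem.List.dedup_eq_ofList, PySem.Set.ofList_eq_foldl, List.foldl_cons]
  have hadd0 : PySem.Set.add ([] : List String) x = [x] := by
    simp [PySem.Set.add, PySem.Set.contains]
  rw [hadd0, pvFoldAdd_acc l [x]]
  simp only [List.singleton_append, List.cons.injEq, true_and]
  apply List.filter_congr
  intro y _
  by_cases hyx : y = x <;> simp [hyx]

lemma pvDedup_filter (P : String → Bool) : ∀ (l : List String),
    PySem.List.dedup (l.filter P) = (PySem.List.dedup l).filter P
  | [] => by simp [PySem.List.dedup_eq_ofList, PySem.Set.ofList]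
  | x :: l => by
    rw [List.filter_cons, pvDedup_cons x l, List.filter_cons]
    by_cases hP : P x
    · rw [if_pos (by simpa using hP), if_pos (by simpa using hP), pvDedup_cons,
        pvDedup_filter P l, List.filter_filter, List.filter_filter]
      congr 1
      apply List.filter_congr
      intro y _
      exact Bool.and_comm _ _
    · rw [if_neg (by simpa using hP), if_neg (by simpa using hP), pvDedup_filter P l,
        List.filter_filter]
      apply List.filter_congr
      intro y _
      by_cases hyx : y = x
      · subst hyx; simp [hP]
      · simp [hyx]

lemma pvDedup_pairwise : ∀ (l : List String),
    (PySem.List.dedup l).Pairwise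
      (fun a b => (PySem.List.index? l a).getD 0 < (PySem.List.index? l b).getD 0)
  | [] => by simp [PySem.List.dedup_eq_ofList, PySem.Set.ofList]
  | x :: l => by
    rw [pvDedup_cons]
    constructor
    · intro b hb
      have hbl : b ∈ PySem.List.dedup l ∧ b ≠ x := by simpa using hb
      have hbm : b ∈ l := (PySem.List.mem_dedup l b).mp hbl.1
      obtain ⟨k, hk⟩ := Option.isSome_iff_exists.mp
        ((PySem.List.index?_isSome_iff l b).mpr hbm)
      rw [PySem.List.index?_cons_self, PySem.List.index?_cons_of_ne l (fun h => hbl.2 h.symm), hk]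
      simp
    · refine List.Pairwise.imp_of_mem ?_ ((pvDedup_pairwise l).filter _)
      intro a b ha hb hab
      have hal : a ∈ PySem.List.dedup l ∧ a ≠ x := by simpa using List.mem_filter.mp ha
      have hbl : b ∈ PySem.List.dedup l ∧ b ≠ x := by simpa using List.mem_filter.mp hb
      obtain ⟨i, hi⟩ := Option.isSome_iff_exists.mp
        ((PySem.List.index?_isSome_iff l a).mpr ((PySem.List.mem_dedup l a).mp hal.1))
      obtain ⟨j, hj⟩ := Option.isSome_iff_exists.mp
        ((PySem.List.index?_isSome_iff l b).mpr ((PySem.List.mem_dedup l b).mp hbl.1))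
      rw [PySem.List.index?_cons_of_ne l (fun h => hal.2 h.symm),
          PySem.List.index?_cons_of_ne l (fun h => hbl.2 h.symm), hi, hj]
      rw [hi, hj] at hab
      simpa using hab

-- B's sort-by-first-index over the supported tuple IS A's ordered dedup of the filtered input
lemma pvSorted_eq_dedup (norm : List String) :
    PySem.List.sorted (pvSupported.filter (fun p => norm.contains p))
        (fun p => (PySem.List.index? norm p).getD 0)  -- norm.index p; the filter guarantees p ∈ norm, so the default is never used
      = PySem.List.dedup (norm.filter (fun p => pvSupported.contains p)) := by
  apply PySem.List.sorted_eq_of_perm_of_pairwise_lt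
  · rw [List.perm_ext_iff_of_nodup (PySem.List.nodup_dedup _)
      (List.Nodup.filter _ (by decide : pvSupported.Nodup))]
    intro a
    simp [List.mem_filter, and_comm]
  · rw [pvDedup_filter]
    exact (pvDedup_pairwise norm).filter _

-- ===== VERDICT (by name: the statement is the Claim_ definition above) =====
theorem normalize_protocols_spec : Claim_equal_normalize_protocols := by
  intro protocols _
  unfold Spec_normalize_protocols normalize_protocols normalize_protocols_alt
  have h := pvFoldA_eq protocols [] PySem.Set.empty (by intro x; rfl)
  simp only []
  rw [h, pvSorted_eq_dedup]
  simp [PySem.List.dedup_eq_ofList, PySem.Set.ofList_eq_foldl]
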